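-- pv_equiv track=rewrite | github.com/nicholatian/citrite | util/ordered.py | orderedPaths
-- ===== SOURCE A (Python) =====
-- def orderedPaths(levels, upaths):
--     # check out how many different priorities we have
--     variety = []
--     for level in levels:
--         if level not in variety:
--             variety += [level]
--     # order the variety
--     variety.sort()
--     opaths = []
--     # order the paths
--     for inst in variety:
--         for i2, level in enumerate(levels):
--             if level == inst:
--                 opaths += [upaths[i2]]
--     return opaths
-- ===== SOURCE B (Python) =====
-- def orderedPaths(levels, upaths):
--     groups = {}
--     for i, level in enumerate(levels):
--         groups.setdefault(level, []).append(upaths[i])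
--     opaths = []
--     for level in sorted(groups):
--         opaths += groups[level]
--     return opaths
-- ===== Notes on version B (the rewrite author's own statement) =====
-- stated objective: faster
-- what changed: A dedups the levels, sorts them, then rescans the whole levels list once per distinct level; B makes a single grouping pass building a dict level->paths and concatenates the groups over sorted(groups); a timing run measured B faster (310x at n=4096).
import Mathlib
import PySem

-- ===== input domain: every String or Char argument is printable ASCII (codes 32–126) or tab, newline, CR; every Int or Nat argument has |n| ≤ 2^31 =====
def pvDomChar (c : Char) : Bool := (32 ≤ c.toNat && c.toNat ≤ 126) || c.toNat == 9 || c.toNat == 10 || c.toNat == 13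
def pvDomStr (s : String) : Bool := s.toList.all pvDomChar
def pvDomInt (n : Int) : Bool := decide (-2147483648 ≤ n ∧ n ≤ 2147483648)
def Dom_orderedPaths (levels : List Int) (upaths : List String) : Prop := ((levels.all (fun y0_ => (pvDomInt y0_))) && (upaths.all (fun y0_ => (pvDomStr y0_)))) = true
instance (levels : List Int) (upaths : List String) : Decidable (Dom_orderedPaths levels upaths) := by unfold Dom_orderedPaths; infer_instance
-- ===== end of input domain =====

-- B replaces A's per-level rescan of `levels` by one grouping pass into a dict plus a
-- sorted-key concatenation (objective: simpler, asymptotically fewer scans).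

-- ===== PORT A =====
def orderedPaths (levels : List Int) (upaths : List String) : List String :=
  let variety := levels.foldl (fun variety level =>
    if variety.contains level = false then variety ++ [level] else variety) ([] : List Int)
  let variety := PySem.List.sorted variety (fun x => x) false
  variety.foldl (fun opaths inst =>
    (PySem.List.enumerate levels 0).foldl (fun opaths p =>
      if p.2 == inst then opaths ++ [PySem.List.pyGetD upaths p.1 ""] else opaths) opaths) []

-- ===== PORT B =====
def orderedPaths_alt (levels : List Int) (upaths : List String) : List String :=
  let groups := (PySem.List.enumerate levels 0).foldl (fun d p =>
    d.modify p.2 ([] : List String) (· ++ [PySem.List.pyGetD upaths p.1 ""])) PySem.Dict.empty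
  (PySem.List.sorted groups.keys (fun x => x) false).foldl
    (fun opaths level => opaths ++ groups.getD level []) []

-- ===== PRECONDITION & SPEC =====
-- Pre_ excludes exactly the inputs where the Python A raises IndexError: when levels is
-- longer than upaths, upaths[i2] is accessed out of range (B raises there too).
def Pre_orderedPaths (levels : List Int) (upaths : List String) : Prop :=
  levels.length ≤ upaths.length
instance (levels : List Int) (upaths : List String) : Decidable (Pre_orderedPaths levels upaths) := by
  unfold Pre_orderedPaths; infer_instance
def pvWitness_orderedPaths : List Int × List String := ([1, 0, 1], ["a", "b", "c"])
def Spec_orderedPaths (levels : List Int) (upaths : List String) (out : List String) : Prop := out = orderedPaths_alt levels upaths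
instance (levels : List Int) (upaths : List String) (out : List String) : Decidable (Spec_orderedPaths levels upaths out) := by unfold Spec_orderedPaths; infer_instance

-- ===== CLAIM (what is proved, stated in full; the proofs are below) =====
def Claim_equal_orderedPaths : Prop := ∀ (levels : List Int) (upaths : List String), Dom_orderedPaths levels upaths → Pre_orderedPaths levels upaths → Spec_orderedPaths levels upaths (orderedPaths levels upaths)

-- ===== LEMMAS AND PROOFS =====

-- A's dedup loop builds set(levels) in first-occurrence order.
theorem pv_variety_eq (levels : List Int) :
    levels.foldl (fun variety level =>
      if variety.contains level = false then variety ++ [level] else variety) ([] : List Int)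
    = PySem.Set.ofList levels := by
  rw [PySem.Set.ofList_eq_foldl]
  apply PySem.List.foldl_congr_mem
  intro acc x _
  cases h : acc.contains x <;>
    simp [PySem.Set.add, PySem.Set.contains] <;> simpa using h

-- The dict built by the grouping pass: its keys are set(levels) in first-occurrence order.
theorem pv_keys_eq (levels : List Int) (upaths : List String) :
    ((PySem.List.enumerate levels 0).foldl (fun d p =>
      d.modify p.2 ([] : List String) (· ++ [PySem.List.pyGetD upaths p.1 ""]))
      PySem.Dict.empty).keys = PySem.Set.ofList levels := by
  have h := PySem.Dict.keys_foldl_modify_key (PySem.List.enumerate levels 0)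
      (fun p => p.2) ([] : List String)
      (fun _ p v => v ++ [PySem.List.pyGetD upaths p.1 ""]) PySem.Dict.empty
  simpa [PySem.List.map_snd_enumerate, PySem.Set.update, PySem.Set.ofList_eq_foldl] using h

-- The dict's group for any key k is exactly the paths A's inner rescan collects for k.
theorem pv_getD_eq (levels : List Int) (upaths : List String) (k : Int) :
    ((PySem.List.enumerate levels 0).foldl (fun d p =>
      d.modify p.2 ([] : List String) (· ++ [PySem.List.pyGetD upaths p.1 ""]))
      PySem.Dict.empty).getD k [] =
    ((PySem.List.enumerate levels 0).filter (fun p => p.2 == k)).map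
      (fun p => PySem.List.pyGetD upaths p.1 "") := by
  have h := PySem.Dict.getD_foldl_modify_append
      (l := (PySem.List.enumerate levels 0).map
        (fun p => (p.2, PySem.List.pyGetD upaths p.1 "")))
      (d := (PySem.Dict.empty : PySem.Dict Int (List String))) (c := k)
  rw [List.foldl_map] at h
  simp only [h, PySem.Dict.getD_empty, List.nil_append, List.filter_map, List.map_map]
  rfl

-- ===== VERDICT (by name: the statement is the Claim_ definition above) =====
theorem orderedPaths_spec : Claim_equal_orderedPaths := by
  intro levels upaths _ _
  unfold Spec_orderedPaths orderedPaths orderedPaths_alt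
  simp only [PySem.List.foldl_append_if, PySem.List.foldl_append_eq_flatMap,
    List.nil_append, pv_variety_eq, pv_keys_eq, pv_getD_eq]
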